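-- pv_equiv track=rewrite | github.com/saulrichardson/newsvlm-analysis | archive/legacy/scripts/llm_law_presence_v4.py | _iter_line_spans
-- ===== SOURCE A (Python) =====
-- def _iter_line_spans(text: str) -> list[tuple[int, int, str]]:
--     spans: list[tuple[int, int, str]] = []
--     start = 0
--     s = str(text or "")
--     for line in s.splitlines(keepends=True):
--         end = start + len(line)
--         spans.append((start, end, line.rstrip("\n")))
--         start = end
--     if not spans and s:
--         spans.append((0, len(s), s))
--     return spans
-- ===== SOURCE B (Python) =====
-- def _iter_line_spans(text: str) -> list[tuple[int, int, str]]: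
--     # One left-to-right character scan: emit each span as soon as its line break
--     # ('\n', '\r\n' or '\r') is seen, instead of splitting first and re-summing lengths.
--     s = str(text or "")
--     spans: list[tuple[int, int, str]] = []
--     n = len(s)
--     start = 0
--     i = 0
--     cur: list[str] = []
--     while i < n:
--         c = s[i]
--         if c == "\n":
--             spans.append((start, i + 1, "".join(cur)))
--             cur = []
--             start = i + 1
--         elif c == "\r":
--             if i + 1 < n and s[i + 1] == "\n":
--                 i += 1
--             spans.append((start, i + 1, "".join(cur) + "\r"))
--             cur = []
--             start = i + 1
--         else:
--             cur.append(c)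
--         i += 1
--     if cur:
--         spans.append((start, n, "".join(cur)))
--     return spans
-- ===== Notes on version B (the rewrite author's own statement) =====
-- stated objective: alternative
-- what changed: Replaces splitlines(keepends=True) followed by a length-resumming loop with a single left-to-right character scan that recognises the LF, CRLF and lone-CR line breaks itself and emits each (start, end, text) span the moment its line break is seen.
import Mathlib
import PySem

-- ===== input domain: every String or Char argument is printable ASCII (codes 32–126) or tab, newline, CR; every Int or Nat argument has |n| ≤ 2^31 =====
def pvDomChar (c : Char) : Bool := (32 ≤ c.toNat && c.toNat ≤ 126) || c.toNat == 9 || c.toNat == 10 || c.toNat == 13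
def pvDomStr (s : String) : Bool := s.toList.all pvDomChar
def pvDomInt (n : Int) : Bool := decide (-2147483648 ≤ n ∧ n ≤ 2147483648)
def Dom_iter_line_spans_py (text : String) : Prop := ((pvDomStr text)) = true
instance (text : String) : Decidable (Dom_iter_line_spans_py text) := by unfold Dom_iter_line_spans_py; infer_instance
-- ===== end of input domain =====

-- B replaces split-then-resum with a single character scan that emits each span
-- as its line break is found (objective: alternative decomposition, same cost).

-- ===== PORT A =====
-- hand port of s.splitlines(keepends=True): PySem has no keepends variant; exact on
-- the Dom alphabet (printables/tab plus '\n', '\r', '\r\n' as the only line breaks)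
def pvSplitKeep : List Char → List Char → List (List Char)
  | [], cur => if cur.isEmpty then [] else [cur]
  | '\n' :: rest, cur => (cur ++ ['\n']) :: pvSplitKeep rest []
  | '\r' :: '\n' :: rest, cur => (cur ++ ['\r', '\n']) :: pvSplitKeep rest []
  | '\r' :: rest, cur => (cur ++ ['\r']) :: pvSplitKeep rest []
  | c :: rest, cur => pvSplitKeep rest (cur ++ [c])

-- hand port of line.rstrip("\n") (rstrip with an explicit chars argument)
def pvRstripNL (cs : List Char) : List Char := (cs.reverse.dropWhile (· == '\n')).reverse

-- the for-loop of A: running offset `start`, one span per line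
def pvALoop : List (List Char) → Int → List (Int × Int × String)
  | [], _ => []
  | l :: ls, start =>
      (start, start + (l.length : Int), String.mk (pvRstripNL l)) :: pvALoop ls (start + (l.length : Int))

def iter_line_spans_py (text : String) : List (Int × Int × String) :=
  -- str(text or "") is the identity on a str argument
  let s := text.toList
  let spans := pvALoop (pvSplitKeep s []) 0
  if spans.isEmpty && !s.isEmpty then [(0, (s.length : Int), String.mk s)] else spans

-- ===== PORT B =====
-- B's while-loop: start = start of current line, i = current index, cur = chars of the
-- current line so far; a span is emitted at each '\n' / '\r\n' / '\r'
def pvBGo : List Char → Int → Int → List Char → List (Int × Int × String)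
  | [], start, i, cur => if cur.isEmpty then [] else [(start, i, String.mk cur)]
  | '\n' :: rest, start, i, cur => (start, i + 1, String.mk cur) :: pvBGo rest (i + 1) (i + 1) []
  | '\r' :: '\n' :: rest, start, i, cur =>
      (start, i + 2, String.mk (cur ++ ['\r'])) :: pvBGo rest (i + 2) (i + 2) []
  | '\r' :: rest, start, i, cur =>
      (start, i + 1, String.mk (cur ++ ['\r'])) :: pvBGo rest (i + 1) (i + 1) []
  | c :: rest, start, i, cur => pvBGo rest start (i + 1) (cur ++ [c])

def iter_line_spans_py_alt (text : String) : List (Int × Int × String) :=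
  pvBGo text.toList 0 0 []

-- ===== PRECONDITION & SPEC =====
def Spec_iter_line_spans_py (text : String) (out : List (Int × Int × String)) : Prop := out = iter_line_spans_py_alt text
instance (text : String) (out : List (Int × Int × String)) : Decidable (Spec_iter_line_spans_py text out) := by unfold Spec_iter_line_spans_py; infer_instance

-- ===== CLAIM (what is proved, stated in full; the proofs are below) =====
def Claim_equal_iter_line_spans_py : Prop := ∀ (text : String), Dom_iter_line_spans_py text → Spec_iter_line_spans_py text (iter_line_spans_py text)

-- ===== LEMMAS AND PROOFS =====

theorem pvSplitKeep_ne_nil (s cur : List Char) (hs : s ≠ [] ∨ cur ≠ []) : pvSplitKeep s cur ≠ [] := by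
  induction s, cur using pvSplitKeep.induct with
  | case1 cur hcur =>
    rcases hs with h | h
    · exact absurd rfl h
    · exact absurd (List.isEmpty_iff.mp hcur) h
  | case2 cur hcur => simp [pvSplitKeep, hcur]
  | case3 rest cur _ => simp [pvSplitKeep]
  | case4 rest cur _ => simp [pvSplitKeep]
  | case5 rest cur hne _ => rw [pvSplitKeep.eq_4 cur rest hne]; simp
  | case6 c rest cur h1 h2 h3 ih =>
    rw [pvSplitKeep.eq_5 cur c rest h1 (fun r hc hr => h2 r hc hr) h3]
    exact ih (Or.inr (by simp))

theorem pvRstripNL_no_nl (cs : List Char) (h : '\n' ∉ cs) : pvRstripNL cs = cs := by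
  unfold pvRstripNL
  rw [List.dropWhile_eq_self_iff.mpr, List.reverse_reverse]
  intro hl
  simp only [beq_iff_eq]
  intro hb
  exact h (List.mem_reverse.mp (hb ▸ List.getElem_mem hl))

theorem pvRstripNL_nl (cur : List Char) (h : '\n' ∉ cur) :
    pvRstripNL (cur ++ ['\n']) = cur := by
  have := pvRstripNL_no_nl cur h
  unfold pvRstripNL at this ⊢
  simp only [List.reverse_append, List.reverse_cons, List.reverse_nil, List.nil_append,
    List.cons_append, List.dropWhile_cons]
  norm_num
  exact this

theorem pvRstripNL_cr (cur : List Char) :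
    pvRstripNL (cur ++ ['\r']) = cur ++ ['\r'] := by
  unfold pvRstripNL
  simp

theorem pvRstripNL_crnl (cur : List Char) :
    pvRstripNL (cur ++ ['\r', '\n']) = cur ++ ['\r'] := by
  unfold pvRstripNL
  simp

theorem pvMain (s cur : List Char) (start : Int) (h : '\n' ∉ cur) :
    pvALoop (pvSplitKeep s cur) start = pvBGo s start (start + (cur.length : Int)) cur := by
  induction s, cur using pvSplitKeep.induct generalizing start with
  | case1 cur hcur =>
    have : cur = [] := List.isEmpty_iff.mp hcur
    subst this
    simp [pvSplitKeep, pvALoop, pvBGo]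
  | case2 cur hcur =>
    simp [pvSplitKeep, hcur, pvALoop, pvBGo, pvRstripNL_no_nl cur h]
  | case3 rest cur ih =>
    simp only [pvSplitKeep, pvALoop, pvBGo, pvRstripNL_nl cur h, ih _ (by simp)]
    simp only [List.length_append, List.length_cons, List.length_nil]
    push_cast
    ring_nf
  | case4 rest cur ih =>
    simp only [pvSplitKeep, pvALoop, pvBGo, pvRstripNL_crnl cur, ih _ (by simp)]
    simp only [List.length_append, List.length_cons, List.length_nil]
    push_cast
    ring_nf
  | case5 rest cur hne ih =>
    have hrest : ∀ r, rest ≠ '\n' :: r := fun r hr => hne r hr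
    rw [pvSplitKeep.eq_4 cur rest hne]
    have hB : pvBGo ('\r' :: rest) start (start + (cur.length : Int)) cur
        = (start, start + (cur.length : Int) + 1, String.mk (cur ++ ['\r']))
          :: pvBGo rest (start + (cur.length : Int) + 1) (start + (cur.length : Int) + 1) [] := by
      cases rest with
      | nil => simp [pvBGo]
      | cons c' rest' =>
        rw [pvBGo.eq_4]
        intro r hc
        exact hrest r hc
    rw [hB]
    simp only [pvALoop, pvRstripNL_cr cur, ih _ (by simp)]
    simp only [List.length_append, List.length_cons, List.length_nil]
    push_cast
    ring_nf
  | case6 c rest cur h1 h2 h3 ih =>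
    have hc : c ≠ '\n' := fun hcc => h1 hcc
    have h' : '\n' ∉ cur ++ [c] := by
      simp only [List.mem_append, List.mem_singleton]
      rintro (hmem | hmem)
      · exact h hmem
      · exact hc hmem.symm
    rw [pvSplitKeep.eq_5 cur c rest h1 (fun r a b => h2 r a b) h3,
      pvBGo.eq_5 start (start + (cur.length : Int)) cur c rest h1 (fun r a b => h2 r a b) h3,
      ih _ h']
    have e : start + ((cur ++ [c]).length : Int) = start + (cur.length : Int) + 1 := by
      push_cast [List.length_append, List.length_cons, List.length_nil]; ring
    rw [e]

theorem pv_no_fallback (text : String) :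
    iter_line_spans_py text = pvALoop (pvSplitKeep text.toList []) 0 := by
  unfold iter_line_spans_py
  cases h : text.toList with
  | nil => simp [pvSplitKeep, pvALoop]
  | cons c rest =>
    have hne := pvSplitKeep_ne_nil (c :: rest) [] (Or.inl (by simp))
    obtain ⟨l, ls, hl⟩ := List.exists_cons_of_ne_nil hne
    simp [hl, pvALoop]

-- ===== VERDICT (by name: the statement is the Claim_ definition above) =====
theorem iter_line_spans_py_spec : Claim_equal_iter_line_spans_py := by
  intro text _
  unfold Spec_iter_line_spans_py iter_line_spans_py_alt
  rw [pv_no_fallback]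
  simpa using pvMain text.toList [] 0 (by simp)
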